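-- pv_equiv track=rewrite | github.com/Rudramore/assign-2 | required_functions.py | transpos_plain_matrix
-- ===== SOURCE A (Python) =====
-- def transpos_plain_matrix(num_rows, num_columns, plain):
--     matrix_e = []
--     index = 0
--
--     for i in range(num_rows):
--         sub_matrix = []
--         for j in range(num_columns):
--             if index < len(plain):
--                 sub_matrix.append(plain[index])
--             else:
--                 sub_matrix.append(None)  # Fill with None or any default value if plain is exhausted
--             index += 1
--         matrix_e.append(sub_matrix)
--
--     return matrix_e
-- ===== SOURCE B (Python) =====
-- def transpos_plain_matrix(num_rows, num_columns, plain):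
--     cols = max(num_columns, 0)
--     padded = list(plain) + [None] * (num_rows * cols - len(plain))
--     return [padded[i * cols:(i + 1) * cols] for i in range(num_rows)]
-- ===== Notes on version B (the rewrite author's own statement) =====
-- stated objective: simpler
-- what changed: Replaces the nested per-cell index/bounds-check loops (with per-cell append) by one padding step (append the missing None cells once) followed by uniform contiguous row slices.
import Mathlib
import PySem

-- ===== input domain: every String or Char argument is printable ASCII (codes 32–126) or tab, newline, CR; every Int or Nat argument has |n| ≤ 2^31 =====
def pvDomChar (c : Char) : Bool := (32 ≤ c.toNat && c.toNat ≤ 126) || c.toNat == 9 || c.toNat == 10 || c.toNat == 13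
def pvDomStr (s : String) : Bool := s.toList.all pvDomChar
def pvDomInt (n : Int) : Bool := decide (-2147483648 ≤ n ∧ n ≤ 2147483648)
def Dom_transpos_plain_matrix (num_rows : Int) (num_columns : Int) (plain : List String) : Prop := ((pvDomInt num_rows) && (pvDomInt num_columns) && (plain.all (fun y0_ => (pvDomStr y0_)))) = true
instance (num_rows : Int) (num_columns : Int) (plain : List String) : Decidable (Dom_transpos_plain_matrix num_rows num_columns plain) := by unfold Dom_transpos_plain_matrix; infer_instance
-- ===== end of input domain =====

-- B replaces A's per-cell bounds-checked nested loops by padding the flat list once and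
-- slicing uniform contiguous rows (objective: simpler decomposition; same asymptotic cost).

-- ===== PORT A =====
-- Literal transliteration of A: outer loop over range(num_rows), inner loop over
-- range(num_columns), shared running `index`; each cell is plain[index] if in range else None.
def transpos_plain_matrix (num_rows : Int) (num_columns : Int) (plain : List String) : List (List (Option String)) :=
  let st :=
    (PySem.List.pyRange 0 num_rows 1).foldl
      (fun (st : List (List (Option String)) × Int) _i =>
        let inner :=
          (PySem.List.pyRange 0 num_columns 1).foldl
            (fun (st2 : List (Option String) × Int) _j =>
              if st2.2 < (plain.length : Int) then
                (st2.1 ++ [PySem.List.pyGet? plain st2.2], st2.2 + 1)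
              else
                (st2.1 ++ [none], st2.2 + 1))
            (([] : List (Option String)), st.2)
        (st.1 ++ [inner.1], inner.2))
      (([] : List (List (Option String))), (0 : Int))
  st.1

-- ===== PORT B =====
-- Literal transliteration of B: cols = max(num_columns, 0); pad the flat list with None
-- up to num_rows*cols cells; row i is the slice padded[i*cols:(i+1)*cols].
def transpos_plain_matrix_alt (num_rows : Int) (num_columns : Int) (plain : List String) : List (List (Option String)) :=
  let cols : Int := max num_columns 0
  let padded : List (Option String) :=
    plain.map some ++ List.replicate (num_rows * cols - (plain.length : Int)).toNat none
  (PySem.List.pyRange 0 num_rows 1).map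
    (fun i => PySem.List.slice padded (some (i * cols)) (some ((i + 1) * cols)))

-- ===== PRECONDITION & SPEC =====
def Spec_transpos_plain_matrix (num_rows : Int) (num_columns : Int) (plain : List String) (out : List (List (Option String))) : Prop := out = transpos_plain_matrix_alt num_rows num_columns plain
instance (num_rows : Int) (num_columns : Int) (plain : List String) (out : List (List (Option String))) : Decidable (Spec_transpos_plain_matrix num_rows num_columns plain out) := by unfold Spec_transpos_plain_matrix; infer_instance

-- ===== CLAIM (what is proved, stated in full; the proofs are below) =====
def Claim_equal_transpos_plain_matrix : Prop := ∀ (num_rows : Int) (num_columns : Int) (plain : List String), Dom_transpos_plain_matrix num_rows num_columns plain → Spec_transpos_plain_matrix num_rows num_columns plain (transpos_plain_matrix num_rows num_columns plain)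

-- ===== LEMMAS AND PROOFS =====

-- A fold whose step ignores the list elements is an iterate of the step.
theorem pv_foldl_ignore {α β : Type} (f : β → β) (l : List α) (init : β) :
    l.foldl (fun st _ => f st) init = f^[l.length] init := by
  induction l generalizing init with
  | nil => rfl
  | cons x xs ih => simp [List.foldl, ih, Function.iterate_succ_apply]

-- The cell A produces at flat index k (for 0 ≤ k): some plain[k] if k < len, else none.
def pvCell (plain : List String) (k : Int) : Option String :=
  if k < (plain.length : Int) then PySem.List.pyGet? plain k else none

-- A's inner-loop step.
def pvStep2 (plain : List String) (st2 : List (Option String) × Int) : List (Option String) × Int :=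
  if st2.2 < (plain.length : Int) then
    (st2.1 ++ [PySem.List.pyGet? plain st2.2], st2.2 + 1)
  else
    (st2.1 ++ [none], st2.2 + 1)

theorem pvStep2_eq (plain : List String) (st2 : List (Option String) × Int) :
    pvStep2 plain st2 = (st2.1 ++ [pvCell plain st2.2], st2.2 + 1) := by
  unfold pvStep2 pvCell
  split_ifs <;> rfl

-- Iterating the inner step C times appends the C cells starting at flat index idx.
theorem pv_inner_iter (plain : List String) (C : ℕ) :
    ∀ (acc : List (Option String)) (idx : Int),
      (pvStep2 plain)^[C] (acc, idx)
        = (acc ++ (List.range C).map (fun j : ℕ => pvCell plain (idx + (j : Int))), idx + (C : Int)) := by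
  induction C with
  | zero => intro acc idx; simp
  | succ n ih =>
    intro acc idx
    rw [Function.iterate_succ_apply', ih, pvStep2_eq, List.range_succ]
    simp only [Prod.mk.injEq]
    exact ⟨by simp [List.append_assoc], by push_cast; ring⟩

-- A's outer-loop step (the inner loop already rewritten as an iterate).
def pvRow (plain : List String) (C : ℕ) (idx : Int) : List (Option String) :=
  (List.range C).map (fun j : ℕ => pvCell plain (idx + (j : Int)))

def pvStep1 (plain : List String) (C : ℕ)
    (st : List (List (Option String)) × Int) : List (List (Option String)) × Int :=
  (st.1 ++ [pvRow plain C st.2], st.2 + C)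

theorem pv_outer_iter (plain : List String) (C : ℕ) (R : ℕ) :
    ∀ (acc : List (List (Option String))) (idx : Int),
      (pvStep1 plain C)^[R] (acc, idx)
        = (acc ++ (List.range R).map (fun i : ℕ => pvRow plain C (idx + (i : Int) * (C : Int))), idx + (R : Int) * (C : Int)) := by
  induction R with
  | zero => intro acc idx; simp
  | succ n ih =>
    intro acc idx
    rw [Function.iterate_succ_apply', ih, List.range_succ]
    unfold pvStep1
    simp only [Prod.mk.injEq]
    exact ⟨by simp [List.append_assoc], by push_cast; ring⟩

-- A computes the rows pvRow (i*C) for i < R, where R/C are the clamped row/col counts.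
theorem pvA_eq (num_rows num_columns : Int) (plain : List String) :
    transpos_plain_matrix num_rows num_columns plain
      = (List.range num_rows.toNat).map
          (fun i : ℕ => pvRow plain num_columns.toNat ((i : Int) * (num_columns.toNat : Int))) := by
  unfold transpos_plain_matrix
  have hinner : ∀ idx : Int,
      (PySem.List.pyRange 0 num_columns 1).foldl
        (fun (st2 : List (Option String) × Int) _j =>
          if st2.2 < (plain.length : Int) then
            (st2.1 ++ [PySem.List.pyGet? plain st2.2], st2.2 + 1)
          else
            (st2.1 ++ [none], st2.2 + 1))
        (([] : List (Option String)), idx)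
        = (pvRow plain num_columns.toNat idx, idx + num_columns.toNat) := by
    intro idx
    have h := pv_foldl_ignore (pvStep2 plain) (PySem.List.pyRange 0 num_columns 1)
      ((([] : List (Option String)), idx))
    simp only [pvStep2] at h
    rw [h, PySem.List.length_pyRange_one, pv_inner_iter]
    simp [pvRow]
  have hfun : (fun (st : List (List (Option String)) × Int) (_i : Int) =>
        let inner :=
          (PySem.List.pyRange 0 num_columns 1).foldl
            (fun (st2 : List (Option String) × Int) _j =>
              if st2.2 < (plain.length : Int) then
                (st2.1 ++ [PySem.List.pyGet? plain st2.2], st2.2 + 1)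
              else
                (st2.1 ++ [none], st2.2 + 1))
            (([] : List (Option String)), st.2)
        (st.1 ++ [inner.1], inner.2))
      = (fun (st : List (List (Option String)) × Int) (_i : Int) => pvStep1 plain num_columns.toNat st) := by
    funext st i
    simp only [hinner st.2]
    rfl
  rw [hfun, pv_foldl_ignore, PySem.List.length_pyRange_one, pv_outer_iter]
  simp

-- Each slice of padded is the corresponding pvRow.
theorem pv_row_eq_slice (num_rows num_columns : Int) (plain : List String)
    (i : ℕ) (hi : i < num_rows.toNat) :
    pvRow plain num_columns.toNat ((i : Int) * (num_columns.toNat : Int))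
      = PySem.List.slice
          (plain.map some ++ List.replicate (num_rows * max num_columns 0 - (plain.length : Int)).toNat none)
          (some ((i : Int) * max num_columns 0)) (some (((i : Int) + 1) * max num_columns 0)) := by
  set C : ℕ := num_columns.toNat with hC
  set R : ℕ := num_rows.toNat with hRdef
  have hmax : (max num_columns 0 : Int) = (C : Int) := by omega
  have hR : num_rows = (R : Int) := by omega
  rw [hmax, hR]
  have hmul : ((R : Int)) * (C : Int) = ((R * C : ℕ) : Int) := by push_cast; ring
  rw [hmul]
  have h1 : ((i : Int) * (C : Int)) = ((i * C : ℕ) : Int) := by push_cast; ring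
  have h2 : (((i : Int) + 1) * (C : Int)) = (((i + 1) * C : ℕ) : Int) := by push_cast; ring
  rw [h1, h2, PySem.List.slice_natCast]
  have hlen : (plain.map some ++ List.replicate (((R * C : ℕ) : Int) - (plain.length : Int)).toNat (none : Option String)).length
      = plain.length + (((R * C : ℕ) : Int) - (plain.length : Int)).toNat := by simp
  have e1 : (i + 1) * C = i * C + C := by ring
  have e2 : ((R * C : ℕ) : Int) = (R : Int) * (C : Int) := by push_cast; ring
  apply List.ext_getElem
  · rw [List.length_take, List.length_drop, hlen]
    unfold pvRow
    rw [List.length_map, List.length_range]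
    have hm : (i + 1) * C ≤ R * C := Nat.mul_le_mul_right C (by omega)
    omega
  · intro j hj1 hj2
    have hjC : j < C := by simpa [pvRow] using hj1
    simp only [pvRow, List.getElem_map, List.getElem_range]
    have hm : (i + 1) * C ≤ R * C := Nat.mul_le_mul_right C (by omega)
    have h4 : i * C + j < (i + 1) * C := by
      calc i * C + j < i * C + C := by omega
        _ = (i + 1) * C := by ring
    have hidx : i * C + j
        < (plain.map some ++ List.replicate (((R * C : ℕ) : Int) - (plain.length : Int)).toNat (none : Option String)).length := by
      rw [hlen]; omega
    rw [List.getElem_take, List.getElem_drop]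
    unfold pvCell
    by_cases hk : i * C + j < plain.length
    · have hlt : (((i * C : ℕ) : Int) + (j : Int)) < (plain.length : Int) := by push_cast; omega
      rw [if_pos hlt]
      have h5 : (((i * C : ℕ) : Int) + (j : Int)) = ((i * C + j : ℕ) : Int) := by push_cast; ring
      rw [h5, PySem.List.pyGet?_natCast]
      rw [List.getElem_append_left (by simpa using hk)]
      simp [hk]
    · have hlt : ¬ (((i * C : ℕ) : Int) + (j : Int)) < (plain.length : Int) := by push_cast; omega
      rw [if_neg hlt]
      rw [List.getElem_append_right (by simpa using hk)]
      simp

-- B computes the same list of rows.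
theorem pvB_eq (num_rows num_columns : Int) (plain : List String) :
    transpos_plain_matrix_alt num_rows num_columns plain
      = (List.range num_rows.toNat).map
          (fun i : ℕ => pvRow plain num_columns.toNat ((i : Int) * (num_columns.toNat : Int))) := by
  unfold transpos_plain_matrix_alt
  rw [PySem.List.pyRange_one]
  simp only [Int.sub_zero, List.map_map]
  apply List.map_congr_left
  intro i hi
  have hi' : i < num_rows.toNat := List.mem_range.mp hi
  have h := pv_row_eq_slice num_rows num_columns plain i hi'
  simp only [Function.comp_apply, zero_add]
  exact h.symm

-- ===== VERDICT (by name: the statement is the Claim_ definition above) =====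
theorem transpos_plain_matrix_spec : Claim_equal_transpos_plain_matrix := by
  intro num_rows num_columns plain _
  unfold Spec_transpos_plain_matrix
  rw [pvA_eq, pvB_eq]
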